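-- pv_equiv track=rewrite | github.com/zhanvwei/targetoffer | 数组中的重复数字.py | duplicate2
-- ===== SOURCE A (Python) =====
-- def duplicate2(arr):
--     """hash表"""
--     hash_map = dict()
--     repeatNum = []
--     for i, val in enumerate(arr):
--         if val in hash_map.keys():
--             repeatNum.append(val)
--             #break
--         hash_map[val] = i
--     return  repeatNum
-- ===== SOURCE B (Python) =====
-- def duplicate2(arr):
--     """group occurrence indices by value, drop each group's first index,
--     then read the values off at the remaining positions in ascending order"""
--     groups = {}
--     for i, v in enumerate(arr):
--         groups.setdefault(v, []).append(i)
--     dup_idx = []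
--     for idxs in groups.values():
--         dup_idx.extend(idxs[1:])
--     dup_idx.sort()
--     return [arr[i] for i in dup_idx]
-- ===== Notes on version B (the rewrite author's own statement) =====
-- stated objective: alternative
-- what changed: Instead of one pass with a seen-dict appending repeats on the fly, B groups occurrence indices by value, drops each group's first index, sorts the remaining indices and reads the values back off the array.
import Mathlib
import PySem

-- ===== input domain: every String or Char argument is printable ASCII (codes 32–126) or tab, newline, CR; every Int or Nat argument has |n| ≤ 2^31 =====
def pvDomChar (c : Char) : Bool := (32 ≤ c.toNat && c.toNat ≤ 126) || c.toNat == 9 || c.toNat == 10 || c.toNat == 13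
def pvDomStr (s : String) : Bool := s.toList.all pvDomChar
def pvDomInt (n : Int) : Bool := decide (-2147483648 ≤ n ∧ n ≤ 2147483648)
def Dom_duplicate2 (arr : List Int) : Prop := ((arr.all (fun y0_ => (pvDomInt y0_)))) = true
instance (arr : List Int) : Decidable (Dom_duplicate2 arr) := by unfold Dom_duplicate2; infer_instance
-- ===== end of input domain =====

-- B replaces A's single on-line pass with a seen-dict by a group-by algorithm: group the
-- occurrence indices by value, drop each group's first index, sort the remaining indices
-- and read the values back off the array (same return value, different algorithm).

-- ===== PORT A =====
-- A's loop body: if val is already a key, append it to the result; then hash_map[val] = i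
def aStep (st : PySem.Dict Int Int × List Int) (p : Int × Int) : PySem.Dict Int Int × List Int :=
  (st.1.insert p.2 p.1, if st.1.contains p.2 then st.2 ++ [p.2] else st.2)

def duplicate2 (arr : List Int) : List Int :=
  ((PySem.List.enumerate arr 0).foldl aStep (PySem.Dict.empty, [])).2

-- ===== PORT B =====
-- groups.setdefault(v, []).append(i)  ==  groups[v] = groups.get(v, []) + [i]  ==  Dict.modify
def duplicate2_alt (arr : List Int) : List Int :=
  let groups := (PySem.List.enumerate arr 0).foldl
      (fun d p => d.modify p.2 [] (· ++ [p.1])) PySem.Dict.empty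
  let dupIdx := groups.values.foldl
      (fun acc idxs => acc ++ PySem.List.slice idxs (some 1) none) []
  -- dup_idx.sort() then [arr[i] for i in dup_idx]; indices are in range, so pyGetD is exact
  (PySem.List.sorted dupIdx (fun x => x) false).map (fun i => PySem.List.pyGetD arr i 0)

-- ===== PRECONDITION & SPEC =====
def Spec_duplicate2 (arr : List Int) (out : List Int) : Prop := out = duplicate2_alt arr
instance (arr : List Int) (out : List Int) : Decidable (Spec_duplicate2 arr out) := by unfold Spec_duplicate2; infer_instance

-- ===== CLAIM (what is proved, stated in full; the proofs are below) =====
def Claim_equal_duplicate2 : Prop := ∀ (arr : List Int), Dom_duplicate2 arr → Spec_duplicate2 arr (duplicate2 arr)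

-- ===== LEMMAS AND PROOFS =====

-- canonical description: the occurrences (i, v) whose value already appears before index i
def ascList (arr : List Int) : List (Int × Int) :=
  (PySem.List.enumerate arr 0).filter (fun p => decide (p.2 ∈ arr.take p.1.toNat))

-- occurrence indices of v in arr, in increasing order
def idxsOf (arr : List Int) (v : Int) : List Int :=
  ((PySem.List.enumerate arr 0).filter (fun p => p.2 == v)).map (·.1)

-- ---- A equals the canonical description ----
lemma aLoop_eq (rest : List Int) : ∀ (pre : List Int) (d : PySem.Dict Int Int) (res : List Int),
    (∀ v, d.contains v = true ↔ v ∈ pre) →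
    ((PySem.List.enumerate rest (pre.length : Int)).foldl aStep (d, res)).2
      = res ++ (((PySem.List.enumerate rest (pre.length : Int)).filter
          (fun p => decide (p.2 ∈ (pre ++ rest).take p.1.toNat))).map (·.2)) := by
  induction rest with
  | nil => intro pre d res _; simp [PySem.List.enumerate_nil]
  | cons x rest ih =>
    intro pre d res h
    rw [PySem.List.enumerate_cons, List.foldl_cons, List.filter_cons]
    have h' : ∀ v, ((d.insert x (pre.length : Int)).contains v = true) ↔ v ∈ pre ++ [x] := by
      intro v; simp [PySem.Dict.contains_insert, h v, or_comm]
    have hrec := ih (pre ++ [x]) (d.insert x (pre.length : Int))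
        (if d.contains x then res ++ [x] else res) h'
    simp only [List.append_assoc, List.singleton_append, List.length_append,
      List.length_singleton, Nat.cast_add, Nat.cast_one] at hrec
    have hA : aStep (d, res) ((pre.length : Int), x)
        = (d.insert x (pre.length : Int), if d.contains x then res ++ [x] else res) := rfl
    rw [hA, hrec]
    by_cases hx : x ∈ pre
    · rw [if_pos ((h x).mpr hx)]
      have : (decide (x ∈ (pre ++ x :: rest).take ((pre.length : Int)).toNat)) = true := by
        simp [hx]
      rw [this]
      simp
    · have hcx : d.contains x = false := by
        cases hc : d.contains x
        · rfl
        · exact absurd ((h x).mp hc) hx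
      rw [hcx]
      have : (decide (x ∈ (pre ++ x :: rest).take ((pre.length : Int)).toNat)) = false := by
        simp [hx]
      rw [this]
      simp

lemma a_eq_asc (arr : List Int) : duplicate2 arr = (ascList arr).map (·.2) := by
  have := aLoop_eq arr [] PySem.Dict.empty [] (by intro v; simp [PySem.Dict.contains_empty])
  simpa [duplicate2, ascList] using this

-- ---- B's groups dict ----
lemma groups_getD (arr : List Int) (v : Int) :
    (((PySem.List.enumerate arr 0).foldl (fun d p => d.modify p.2 [] (· ++ [p.1]))
        PySem.Dict.empty).getD v []) = idxsOf arr v := by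
  have hswap : (PySem.List.enumerate arr 0).foldl (fun d p => d.modify p.2 [] (· ++ [p.1]))
        PySem.Dict.empty
      = ((PySem.List.enumerate arr 0).map Prod.swap).foldl
          (fun d p => d.modify p.1 [] (· ++ [p.2])) PySem.Dict.empty := by
    rw [List.foldl_map]
    rfl
  rw [hswap, PySem.Dict.getD_foldl_modify_append]
  simp [idxsOf, List.filter_map, List.map_map, Function.comp_def, Prod.swap]

lemma groups_keys (arr : List Int) :
    ((PySem.List.enumerate arr 0).foldl (fun d p => d.modify p.2 [] (· ++ [p.1]))
        PySem.Dict.empty).keys = PySem.Set.ofList arr := by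
  have := PySem.Dict.keys_foldl_modify_key (PySem.List.enumerate arr 0) (fun p => p.2) []
      (fun _ p => (· ++ [p.1])) PySem.Dict.empty
  rw [this]
  simp [PySem.Set.update_nil_left, PySem.List.map_snd_enumerate]

lemma groups_values (arr : List Int) :
    ((PySem.List.enumerate arr 0).foldl (fun d p => d.modify p.2 [] (· ++ [p.1]))
        PySem.Dict.empty).values = (PySem.Set.ofList arr).map (idxsOf arr) := by
  have hnd := PySem.Dict.nodup_keys_foldl_modify_key (PySem.List.enumerate arr 0)
      (fun p => p.2) [] (fun _ p => (· ++ [p.1])) PySem.Dict.empty (by simp [PySem.Dict.keys_empty])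
  rw [PySem.Dict.values_eq_map_keys _ hnd [], groups_keys arr]
  exact List.map_congr_left (fun v _ => groups_getD arr v)

-- ---- facts about idxsOf ----
lemma mem_idxsOf (arr : List Int) (v i : Int) :
    i ∈ idxsOf arr v ↔ ∃ (k : Nat) (h : k < arr.length), i = (k : Int) ∧ arr[k] = v := by
  unfold idxsOf
  simp only [List.mem_map, List.mem_filter]
  constructor
  · rintro ⟨p, ⟨hp, hv⟩, rfl⟩
    obtain ⟨k, hk, rfl⟩ := (PySem.List.mem_enumerate_iff arr 0 p).mp hp
    exact ⟨k, hk, by simpa using hv⟩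
  · rintro ⟨k, hk, rfl, hv⟩
    exact ⟨((k : Int), arr[k]), ⟨(PySem.List.mem_enumerate_iff arr 0 _).mpr
      ⟨k, hk, by simp⟩, by simpa using hv⟩, rfl⟩

lemma idxsOf_pairwise (arr : List Int) (v : Int) : (idxsOf arr v).Pairwise (· < ·) := by
  unfold idxsOf
  exact List.Pairwise.map _ (fun p q h => h)
    ((PySem.List.pairwise_lt_enumerate arr 0).filter _)

-- in a strictly increasing list, the tail is the members having a smaller member
lemma mem_tail_sorted (l : List Int) (hl : l.Pairwise (· < ·)) (i : Int) :
    i ∈ l.tail ↔ i ∈ l ∧ ∃ j ∈ l, j < i := by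
  cases l with
  | nil => simp
  | cons a t =>
    rcases List.pairwise_cons.mp hl with ⟨ha, _⟩
    simp only [List.tail_cons, List.mem_cons]
    constructor
    · intro hit
      exact ⟨Or.inr hit, a, Or.inl rfl, ha i hit⟩
    · rintro ⟨hi, j, hj, hji⟩
      rcases hi with rfl | hit
      · rcases hj with rfl | hjt
        · omega
        · exact absurd (ha j hjt) (by omega)
      · exact hit

-- ---- the canonical index list ----
lemma mem_take_iff (l : List Int) (n : Nat) (a : Int) :
    a ∈ l.take n ↔ ∃ (m : Nat) (h : m < l.length), m < n ∧ l[m] = a := by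
  rw [List.mem_iff_getElem]
  constructor
  · rintro ⟨i, hi, hget⟩
    have hlen : i < min n l.length := by simpa using hi
    refine ⟨i, by omega, by omega, ?_⟩
    rw [← List.getElem_take]
    exact hget
  · rintro ⟨m, h, hmn, hget⟩
    refine ⟨m, by simp; omega, ?_⟩
    rw [List.getElem_take]
    exact hget

lemma asc_map_fst_pairwise (arr : List Int) : ((ascList arr).map (·.1)).Pairwise (· < ·) := by
  unfold ascList
  exact List.Pairwise.map _ (fun p q h => h)
    ((PySem.List.pairwise_lt_enumerate arr 0).filter _)

lemma mem_asc_fst (arr : List Int) (i : Int) :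
    i ∈ (ascList arr).map (·.1) ↔ ∃ v ∈ PySem.Set.ofList arr, i ∈ (idxsOf arr v).tail := by
  have hmem : ∀ w, w ∈ PySem.Set.ofList arr ↔ w ∈ arr := fun w => PySem.Set.mem_ofList arr w
  unfold ascList
  simp only [List.mem_map, List.mem_filter]
  constructor
  · rintro ⟨p, ⟨hp, hc⟩, rfl⟩
    obtain ⟨k, hk, rfl⟩ := (PySem.List.mem_enumerate_iff arr 0 p).mp hp
    simp only [zero_add, decide_eq_true_eq, Int.toNat_natCast] at hc ⊢
    obtain ⟨m, hm, hmk, hget⟩ := (mem_take_iff arr k arr[k]).mp hc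
    refine ⟨arr[k], (hmem _).mpr (List.getElem_mem hk), ?_⟩
    rw [mem_tail_sorted _ (idxsOf_pairwise arr arr[k])]
    refine ⟨(mem_idxsOf arr arr[k] _).mpr ⟨k, hk, rfl, rfl⟩, (m : Int),
      (mem_idxsOf arr arr[k] _).mpr ⟨m, hm, rfl, hget⟩, by exact_mod_cast hmk⟩
  · rintro ⟨v, hv, hit⟩
    rw [mem_tail_sorted _ (idxsOf_pairwise arr v)] at hit
    obtain ⟨hi, j, hj, hji⟩ := hit
    obtain ⟨k, hk, rfl, hgk⟩ := (mem_idxsOf arr v i).mp hi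
    obtain ⟨m, hm, rfl, hgm⟩ := (mem_idxsOf arr v j).mp hj
    refine ⟨((k : Int), arr[k]), ⟨(PySem.List.mem_enumerate_iff arr 0 _).mpr ⟨k, hk, by simp⟩, ?_⟩, rfl⟩
    simp only [decide_eq_true_eq, Int.toNat_natCast]
    exact (mem_take_iff arr k arr[k]).mpr ⟨m, hm, by exact_mod_cast hji, by rw [hgm, hgk]⟩

lemma dupIdx_eq (arr : List Int) :
    ((PySem.Set.ofList arr).map (idxsOf arr)).foldl
        (fun acc idxs => acc ++ PySem.List.slice idxs (some 1) none) []
      = (PySem.Set.ofList arr).flatMap (fun v => (idxsOf arr v).tail) := by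
  rw [PySem.List.foldl_append_eq_flatMap, List.flatMap_map]
  simp [PySem.List.slice_from_one]

lemma dupIdx_nodup (arr : List Int) :
    ((PySem.Set.ofList arr).flatMap (fun v => (idxsOf arr v).tail)).Nodup := by
  rw [List.nodup_flatMap]
  constructor
  · intro v _
    exact (((idxsOf_pairwise arr v).imp fun h => ne_of_lt h).tail)
  · refine (PySem.Set.nodup_ofList arr).imp ?_
    intro v w hvw i hiv hiw
    obtain ⟨k, hk, rfl, hgk⟩ := (mem_idxsOf arr v _).mp (List.mem_of_mem_tail hiv)
    obtain ⟨m, hm, hkm, hgm⟩ := (mem_idxsOf arr w _).mp (List.mem_of_mem_tail hiw)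
    have : k = m := by exact_mod_cast hkm
    subst this
    exact hvw (hgk ▸ hgm ▸ rfl)

lemma sorted_dupIdx (arr : List Int) :
    PySem.List.sorted ((PySem.Set.ofList arr).flatMap (fun v => (idxsOf arr v).tail))
        (fun x => x) false = (ascList arr).map (·.1) := by
  apply PySem.List.sorted_eq_of_perm_of_pairwise_lt
  · apply (List.perm_ext_iff_of_nodup ?_ (dupIdx_nodup arr)).mpr
    · intro a
      rw [List.mem_flatMap, ← mem_asc_fst]
    · exact (asc_map_fst_pairwise arr).imp fun h => ne_of_lt h
  · exact asc_map_fst_pairwise arr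

lemma b_eq_asc (arr : List Int) : duplicate2_alt arr = (ascList arr).map (·.2) := by
  unfold duplicate2_alt
  simp only []
  rw [groups_values, dupIdx_eq, sorted_dupIdx, List.map_map]
  apply List.map_congr_left
  intro p hp
  have hp' : p ∈ PySem.List.enumerate arr 0 := List.mem_of_mem_filter hp
  obtain ⟨k, hk, rfl⟩ := (PySem.List.mem_enumerate_iff arr 0 p).mp hp'
  simp [PySem.List.pyGetD_natCast, hk]

-- ===== VERDICT (by name: the statement is the Claim_ definition above) =====
theorem duplicate2_spec : Claim_equal_duplicate2 := by
  intro arr _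
  unfold Spec_duplicate2
  rw [a_eq_asc, b_eq_asc]
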